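-- pv_equiv track=rewrite | github.com/ramcarreno/pos-tagger | eda/utils.py | build_counts
-- ===== SOURCE A (Python) =====
-- from collections import Counter
--
-- def build_counts(dataset: list[list[tuple]]) -> tuple[Counter, Counter, Counter]:
--     token_counts = Counter()
--     tag_counts = Counter()
--     pair_counts = Counter()
--
--     for sentence in dataset:
--         for token, tag in sentence:
--             token_counts[token] += 1
--             tag_counts[tag] += 1
--             pair_counts[f"({token},{tag})"] += 1
--
--     return token_counts, tag_counts, pair_counts
-- ===== SOURCE B (Python) =====
-- from collections import Counter
--
-- def build_counts(dataset):
--     # Aggregate first: count each distinct (token, tag) pair once over the whole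
--     # dataset, then derive all three counters from that weighted summary, so the
--     # per-occurrence work (three dict updates + string formatting) is done only
--     # once per DISTINCT pair instead of once per occurrence.
--     pair_tuple_counts = Counter()
--     for sentence in dataset:
--         pair_tuple_counts.update(sentence)
--
--     token_counts = Counter()
--     tag_counts = Counter()
--     pair_counts = Counter()
--     for (token, tag), c in pair_tuple_counts.items():
--         token_counts[token] += c
--         tag_counts[tag] += c
--         pair_counts[f"({token},{tag})"] += c
--     return token_counts, tag_counts, pair_counts
-- ===== Notes on version B (the rewrite author's own statement) =====
-- stated objective: alternative
-- what changed: Instead of incrementing three counters per token occurrence, B first aggregates the dataset into one Counter of distinct (token,tag) pairs (via Counter.update per sentence) and then derives the three returned counters from that weighted summary, doing the three updates and the string formatting once per distinct pair rather than once per occurrence.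
import Mathlib
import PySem

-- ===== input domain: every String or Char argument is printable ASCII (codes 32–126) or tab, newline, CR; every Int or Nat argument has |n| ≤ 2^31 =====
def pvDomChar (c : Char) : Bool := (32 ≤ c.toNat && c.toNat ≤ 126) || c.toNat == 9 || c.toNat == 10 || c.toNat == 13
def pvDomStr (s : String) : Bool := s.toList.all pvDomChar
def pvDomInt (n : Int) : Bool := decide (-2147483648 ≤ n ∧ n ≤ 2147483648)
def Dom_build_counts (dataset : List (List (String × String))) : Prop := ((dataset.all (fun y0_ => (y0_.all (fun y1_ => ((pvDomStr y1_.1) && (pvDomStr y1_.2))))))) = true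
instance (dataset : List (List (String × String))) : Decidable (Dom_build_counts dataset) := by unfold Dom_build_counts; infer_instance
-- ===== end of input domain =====

-- B aggregates the dataset into one Counter of distinct (token,tag) pairs first and derives the
-- three returned counters from that weighted summary (objective: alternative); A updates all
-- three counters once per occurrence. Return values are identical.

-- f"({token},{tag})" (exact: string concatenation of ASCII pieces)
def pvPairKey (token tag : String) : String := PySem.Str.join "" ["(", token, ",", tag, ")"]

-- ===== PORT A =====
def build_counts (dataset : List (List (String × String))) : (List (String × Int)) × (List (String × Int)) × (List (String × Int)) :=
  let r := dataset.foldl (fun st sentence =>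
      sentence.foldl (fun st p =>
        (st.1.modify p.1 0 (· + 1),
         st.2.1.modify p.2 0 (· + 1),
         st.2.2.modify (pvPairKey p.1 p.2) 0 (· + 1))) st)
    (PySem.Dict.empty, PySem.Dict.empty, PySem.Dict.empty)
  (r.1.items, r.2.1.items, r.2.2.items)

-- ===== PORT B =====
def build_counts_alt (dataset : List (List (String × String))) : (List (String × Int)) × (List (String × Int)) × (List (String × Int)) :=
  -- Counter.update(sentence) increments the count of each sentence element in order (exact)
  let ptc := dataset.foldl (fun d sentence =>
      sentence.foldl (fun d p => d.modify p 0 (· + 1)) d)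
    (PySem.Dict.empty : PySem.Dict (String × String) Int)
  let r := ptc.items.foldl (fun st a =>
      (st.1.modify a.1.1 0 (· + a.2),
       st.2.1.modify a.1.2 0 (· + a.2),
       st.2.2.modify (pvPairKey a.1.1 a.1.2) 0 (· + a.2)))
    (PySem.Dict.empty, PySem.Dict.empty, PySem.Dict.empty)
  (r.1.items, r.2.1.items, r.2.2.items)

-- ===== PRECONDITION & SPEC =====
def Spec_build_counts (dataset : List (List (String × String))) (out : (List (String × Int)) × (List (String × Int)) × (List (String × Int))) : Prop := out = build_counts_alt dataset
instance (dataset : List (List (String × String))) (out : (List (String × Int)) × (List (String × Int)) × (List (String × Int))) : Decidable (Spec_build_counts dataset out) := by unfold Spec_build_counts; infer_instance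

-- ===== CLAIM (what is proved, stated in full; the proofs are below) =====
def Claim_equal_build_counts : Prop := ∀ (dataset : List (List (String × String))), Dom_build_counts dataset → Spec_build_counts dataset (build_counts dataset)

-- ===== LEMMAS AND PROOFS =====

-- A's inner loop over a pair list splits into three independent folds.
theorem pv_fold_split (l : List (String × String))
    (s : PySem.Dict String Int × PySem.Dict String Int × PySem.Dict String Int) :
    l.foldl (fun st p =>
        (st.1.modify p.1 0 (· + 1),
         st.2.1.modify p.2 0 (· + 1),
         st.2.2.modify (pvPairKey p.1 p.2) 0 (· + 1))) s
      = (l.foldl (fun d p => d.modify p.1 0 (· + 1)) s.1,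
         l.foldl (fun d p => d.modify p.2 0 (· + 1)) s.2.1,
         l.foldl (fun d p => d.modify (pvPairKey p.1 p.2) 0 (· + 1)) s.2.2) := by
  induction l generalizing s with
  | nil => rfl
  | cons x t ih => simp [List.foldl_cons, ih]

-- A's outer loop over sentences splits componentwise as well.
theorem pv_outer_split (dataset : List (List (String × String)))
    (s : PySem.Dict String Int × PySem.Dict String Int × PySem.Dict String Int) :
    dataset.foldl (fun st sentence =>
        sentence.foldl (fun st p =>
          (st.1.modify p.1 0 (· + 1),
           st.2.1.modify p.2 0 (· + 1),
           st.2.2.modify (pvPairKey p.1 p.2) 0 (· + 1))) st) s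
      = (dataset.foldl (fun d sen => sen.foldl (fun d p => d.modify p.1 0 (· + 1)) d) s.1,
         dataset.foldl (fun d sen => sen.foldl (fun d p => d.modify p.2 0 (· + 1)) d) s.2.1,
         dataset.foldl (fun d sen => sen.foldl (fun d p => d.modify (pvPairKey p.1 p.2) 0 (· + 1)) d) s.2.2) := by
  induction dataset generalizing s with
  | nil => rfl
  | cons x t ih => rw [List.foldl_cons, pv_fold_split, ih]; rfl

-- B's loop over the pair-counter items splits into three independent folds.
theorem pv_items_fold_split (l : List ((String × String) × Int))
    (s : PySem.Dict String Int × PySem.Dict String Int × PySem.Dict String Int) :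
    l.foldl (fun st a =>
        (st.1.modify a.1.1 0 (· + a.2),
         st.2.1.modify a.1.2 0 (· + a.2),
         st.2.2.modify (pvPairKey a.1.1 a.1.2) 0 (· + a.2))) s
      = (l.foldl (fun d a => d.modify a.1.1 0 (· + a.2)) s.1,
         l.foldl (fun d a => d.modify a.1.2 0 (· + a.2)) s.2.1,
         l.foldl (fun d a => d.modify (pvPairKey a.1.1 a.1.2) 0 (· + a.2)) s.2.2) := by
  induction l generalizing s with
  | nil => rfl
  | cons x t ih => simp [List.foldl_cons, ih]

-- dedupping the image of a dedupped list gives the dedup of the image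
theorem pv_ofList_map_foldl {α β : Type} [BEq α] [LawfulBEq α] [BEq β] [LawfulBEq β]
    (f : α → β) (l : List α) (s : PySem.Set α) :
    PySem.Set.ofList ((l.foldl PySem.Set.add s).map f)
      = (l.map f).foldl PySem.Set.add (PySem.Set.ofList (s.map f)) := by
  induction l generalizing s with
  | nil => rfl
  | cons x t ih =>
      rw [List.foldl_cons, ih, List.map_cons, List.foldl_cons]
      congr 1
      by_cases hxm : x ∈ s
      · have hcm : f x ∈ PySem.Set.ofList (s.map f) := by
          rw [PySem.Set.mem_ofList]; exact List.mem_map_of_mem hxm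
        rw [show PySem.Set.add s x = s from by simp [PySem.Set.add, hxm],
          show PySem.Set.add (PySem.Set.ofList (s.map f)) (f x)
              = PySem.Set.ofList (s.map f) from by simp [PySem.Set.add, hcm]]
      · rw [show PySem.Set.add s x = s ++ [x] from by simp [PySem.Set.add, hxm],
          List.map_append, PySem.Set.ofList_eq_foldl, List.foldl_append,
          ← PySem.Set.ofList_eq_foldl]
        rfl

theorem pv_ofList_map {α β : Type} [BEq α] [LawfulBEq α] [BEq β] [LawfulBEq β]
    (f : α → β) (l : List α) :
    PySem.Set.ofList ((PySem.Set.ofList l).map f) = PySem.Set.ofList (l.map f) := by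
  have h := pv_ofList_map_foldl f l ([] : PySem.Set α)
  simpa [PySem.Set.ofList_eq_foldl] using h

-- getD after a weighted modify-fold: the sum of the weights whose key hits k
theorem pv_getD_weighted (f : (String × String) → String)
    (l : List ((String × String) × Int)) (d : PySem.Dict String Int) (k : String) :
    (l.foldl (fun d a => d.modify (f a.1) 0 (· + a.2)) d).getD k 0
      = d.getD k 0 + ((l.filter (fun a => f a.1 == k)).map (·.2)).sum := by
  induction l generalizing d with
  | nil => simp
  | cons a t ih =>
      rw [List.foldl_cons, ih, PySem.Dict.getD_modify, List.filter_cons]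
      by_cases h : k = f a.1
      · simp [h, eq_comm]
        ring
      · have h' : (f a.1 == k) = false := by simp [Ne.symm h]
        simp [h, h']

-- sum of occurrence counts over the distinct hits of k equals the count of k in the image
theorem pv_sum_counts (f : (String × String) → String) (k : String)
    (l : List (String × String)) :
    ((((PySem.Set.ofList l).map (fun q => (q, (l.count q : Int)))).filter
        (fun a => f a.1 == k)).map (·.2)).sum = ((l.map f).count k : Int) := by
  rw [List.filter_map, List.map_map]
  simp only [Function.comp_def]
  have hperm : (PySem.Set.ofList l).Perm l.dedup := by
    rw [List.perm_ext_iff_of_nodup (PySem.Set.nodup_ofList l) l.nodup_dedup]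
    intro a; rw [PySem.Set.mem_ofList, List.mem_dedup]
  have hp := (hperm.filter (fun q => f q == k)).map
      (fun q : String × String => (l.count q : Int))
  rw [hp.sum_eq]
  have hcast : ((l.dedup.filter (fun q => f q == k)).map
        (fun q : String × String => (l.count q : Int))).sum
      = (((l.dedup.filter (fun q => f q == k)).map (fun q => l.count q)).sum : Int) := by
    rw [Nat.cast_list_sum, List.map_map]; rfl
  have hsum := List.sum_map_count_dedup_filter_eq_countP (fun q => f q == k) l
  have hi : (instBEqOfDecidableEq : BEq (String × String)) = instBEqProd :=
    lawful_beq_subsingleton _ _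
  rw [hi] at hsum
  have hc2 : List.count k (List.map f l) = List.countP (fun q => f q == k) l := by
    rw [show List.count k (List.map f l)
          = List.countP (fun x => x == k) (List.map f l) from rfl, List.countP_map]
    rfl
  rw [hcast, hc2, ← hsum]

-- master lemma: folding the counter's weighted items equals counting the mapped stream
theorem pv_counter_items_fold (f : (String × String) → String)
    (l : List (String × String)) :
    (PySem.Dict.counter l).items.foldl (fun d a => d.modify (f a.1) 0 (· + a.2))
        PySem.Dict.empty
      = PySem.Dict.counter (l.map f) := by
  have hn1 : ((PySem.Dict.counter l).items.foldl
      (fun d a => d.modify (f a.1) 0 (· + a.2)) PySem.Dict.empty).keys.Nodup :=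
    PySem.Dict.nodup_keys_foldl_modify_key _ (fun a : (String × String) × Int => f a.1) 0 (fun _ a v => v + a.2) _
      (by rw [PySem.Dict.keys_empty]; exact List.nodup_nil)
  have hn2 : (PySem.Dict.counter (l.map f)).keys.Nodup := PySem.Dict.nodup_keys_counter _
  have hkeys : ((PySem.Dict.counter l).items.foldl
      (fun d a => d.modify (f a.1) 0 (· + a.2)) PySem.Dict.empty).keys
      = (PySem.Dict.counter (l.map f)).keys := by
    rw [PySem.Dict.keys_foldl_modify_key _ (fun a : (String × String) × Int => f a.1) 0 (fun _ a v => v + a.2),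
      PySem.Dict.keys_counter, PySem.Dict.items_counter, List.map_map]
    show PySem.Set.update PySem.Dict.empty.keys ((PySem.Set.ofList l).map f)
        = PySem.Set.ofList (l.map f)
    rw [← pv_ofList_map f l]
    simp [PySem.Set.update, PySem.Set.ofList_eq_foldl, PySem.Dict.keys]
    rfl
  have hgetD : ∀ k, ((PySem.Dict.counter l).items.foldl
      (fun d a => d.modify (f a.1) 0 (· + a.2)) PySem.Dict.empty).getD k 0
      = (PySem.Dict.counter (l.map f)).getD k 0 := by
    intro k
    rw [pv_getD_weighted, PySem.Dict.getD_counter, PySem.Dict.items_counter,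
      pv_sum_counts]
    simp
  apply PySem.Dict.ext
  rw [PySem.Dict.items_eq_map_keys _ hn1 0, PySem.Dict.items_eq_map_keys _ hn2 0, hkeys]
  exact List.map_congr_left (fun k _ => by rw [hgetD k])

-- ===== VERDICT (by name: the statement is the Claim_ definition above) =====

theorem build_counts_spec : Claim_equal_build_counts := by
  intro dataset _
  show build_counts dataset = build_counts_alt dataset
  simp only [build_counts, build_counts_alt]
  rw [pv_outer_split]
  have hptc : dataset.foldl (fun d sentence =>
        sentence.foldl (fun d p => d.modify p 0 (· + 1)) d)
      (PySem.Dict.empty : PySem.Dict (String × String) Int)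
      = PySem.Dict.counter dataset.flatten := by
    rw [PySem.Dict.counter_eq_foldl, List.foldl_flatten]
  rw [hptc, pv_items_fold_split]
  have hA : ∀ f : (String × String) → String,
      dataset.foldl (fun d sen => sen.foldl (fun d p => d.modify (f p) 0 (· + 1)) d)
        (PySem.Dict.empty : PySem.Dict String Int)
      = PySem.Dict.counter (dataset.flatten.map f) := by
    intro f
    rw [PySem.Dict.counter_eq_foldl, List.foldl_map, List.foldl_flatten]
  have h1 := pv_counter_items_fold (fun p => p.1) dataset.flatten
  have h2 := pv_counter_items_fold (fun p => p.2) dataset.flatten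
  have h3 := pv_counter_items_fold (fun p => pvPairKey p.1 p.2) dataset.flatten
  rw [h1, h2, h3, hA (fun p => p.1), hA (fun p => p.2), hA (fun p => pvPairKey p.1 p.2)]
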